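-- pv_equiv track=rewrite | github.com/JeevanandanRamasamy/RU-Algorithmic-Advising | backend/services/schedule_service.py | get_required_gap
-- ===== SOURCE A (Python) =====
-- def get_required_gap(c1, c2):
--     groups = [
--         {"BUSCH", "LIVINGSTON"},
--         {"COLLEGE AVENUE", "COOK/DOUGLASS", "DOWNTOWN"},
--     ]
--     for group in groups:
--         if c1 in group and c2 in group:
--             return 30
--     return 40
-- ===== SOURCE B (Python) =====
-- # The same-region relation is materialised as a table of ordered pairs;
-- # the answer is a single membership test on (c1, c2).
-- _SAME_REGION_PAIRS = {
--     ("BUSCH", "BUSCH"), ("BUSCH", "LIVINGSTON"),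
--     ("LIVINGSTON", "BUSCH"), ("LIVINGSTON", "LIVINGSTON"),
--     ("COLLEGE AVENUE", "COLLEGE AVENUE"), ("COLLEGE AVENUE", "COOK/DOUGLASS"),
--     ("COLLEGE AVENUE", "DOWNTOWN"),
--     ("COOK/DOUGLASS", "COLLEGE AVENUE"), ("COOK/DOUGLASS", "COOK/DOUGLASS"),
--     ("COOK/DOUGLASS", "DOWNTOWN"),
--     ("DOWNTOWN", "COLLEGE AVENUE"), ("DOWNTOWN", "COOK/DOUGLASS"),
--     ("DOWNTOWN", "DOWNTOWN"),
-- }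
--
--
-- def get_required_gap(c1, c2):
--     return 30 if (c1, c2) in _SAME_REGION_PAIRS else 40
-- ===== Notes on version B (the rewrite author's own statement) =====
-- stated objective: simpler
-- what changed: Materialises the same-region relation as an explicit table of the 13 ordered campus pairs and answers with a single membership test on (c1, c2), instead of looping over group sets and testing each argument's membership separately.
import Mathlib
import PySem

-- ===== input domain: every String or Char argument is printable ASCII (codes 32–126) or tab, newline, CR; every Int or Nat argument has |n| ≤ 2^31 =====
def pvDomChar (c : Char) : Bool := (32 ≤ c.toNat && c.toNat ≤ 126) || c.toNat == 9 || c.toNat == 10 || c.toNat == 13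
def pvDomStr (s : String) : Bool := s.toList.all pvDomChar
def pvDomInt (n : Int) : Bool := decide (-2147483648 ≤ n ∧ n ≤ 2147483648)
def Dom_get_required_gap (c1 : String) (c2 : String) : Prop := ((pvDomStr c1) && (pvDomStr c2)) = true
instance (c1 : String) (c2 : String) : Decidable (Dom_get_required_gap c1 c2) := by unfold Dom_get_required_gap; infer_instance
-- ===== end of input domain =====

-- B materialises the same-region relation as a table of 13 ordered campus pairs and answers with one pair-membership test (objective: simpler).


-- ===== PORT A =====
-- the 'for group in groups' loop: first group containing both campuses returns 30, else 40
def gapLoop (c1 : String) (c2 : String) : List (PySem.Set String) → Int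
  | [] => 40
  | g :: gs => if PySem.Set.contains g c1 && PySem.Set.contains g c2 then 30 else gapLoop c1 c2 gs

def get_required_gap (c1 : String) (c2 : String) : Int :=
  let groups : List (PySem.Set String) :=
    [PySem.Set.ofList ["BUSCH", "LIVINGSTON"],
     PySem.Set.ofList ["COLLEGE AVENUE", "COOK/DOUGLASS", "DOWNTOWN"]]
  gapLoop c1 c2 groups

-- ===== PORT B =====
-- _SAME_REGION_PAIRS: the same-region relation as a set of ordered pairs
def sameRegionPairs : PySem.Set (String × String) :=
  PySem.Set.ofList
    [("BUSCH", "BUSCH"), ("BUSCH", "LIVINGSTON"),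
     ("LIVINGSTON", "BUSCH"), ("LIVINGSTON", "LIVINGSTON"),
     ("COLLEGE AVENUE", "COLLEGE AVENUE"), ("COLLEGE AVENUE", "COOK/DOUGLASS"),
     ("COLLEGE AVENUE", "DOWNTOWN"),
     ("COOK/DOUGLASS", "COLLEGE AVENUE"), ("COOK/DOUGLASS", "COOK/DOUGLASS"),
     ("COOK/DOUGLASS", "DOWNTOWN"),
     ("DOWNTOWN", "COLLEGE AVENUE"), ("DOWNTOWN", "COOK/DOUGLASS"),
     ("DOWNTOWN", "DOWNTOWN")]

def get_required_gap_alt (c1 : String) (c2 : String) : Int :=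
  if PySem.Set.contains sameRegionPairs (c1, c2) then 30 else 40

-- ===== PRECONDITION & SPEC =====
def Spec_get_required_gap (c1 : String) (c2 : String) (out : Int) : Prop := out = get_required_gap_alt c1 c2
instance (c1 : String) (c2 : String) (out : Int) : Decidable (Spec_get_required_gap c1 c2 out) := by unfold Spec_get_required_gap; infer_instance

-- ===== CLAIM =====
def Claim_equal_get_required_gap : Prop := ∀ (c1 : String) (c2 : String), Dom_get_required_gap c1 c2 → Spec_get_required_gap c1 c2 (get_required_gap c1 c2)

-- ===== LEMMAS AND PROOFS =====

-- A as an explicit boolean membership test against the two group literals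
lemma A_eq (c1 c2 : String) : get_required_gap c1 c2 =
    (if (c1 == "BUSCH" || c1 == "LIVINGSTON") && (c2 == "BUSCH" || c2 == "LIVINGSTON") then 30
     else if (c1 == "COLLEGE AVENUE" || c1 == "COOK/DOUGLASS" || c1 == "DOWNTOWN")
          && (c2 == "COLLEGE AVENUE" || c2 == "COOK/DOUGLASS" || c2 == "DOWNTOWN") then 30
     else 40) := by
  have h1 : PySem.Set.ofList ["BUSCH", "LIVINGSTON"] = ["BUSCH", "LIVINGSTON"] := by decide
  have h2 : PySem.Set.ofList ["COLLEGE AVENUE", "COOK/DOUGLASS", "DOWNTOWN"]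
      = ["COLLEGE AVENUE", "COOK/DOUGLASS", "DOWNTOWN"] := by decide
  simp only [get_required_gap, h1, h2, gapLoop, PySem.Set.contains_eq_listContains,
    List.contains_cons, List.contains_nil, Bool.or_false, Bool.or_assoc]

-- B as an explicit disjunction of pair equalities
lemma B_eq (c1 c2 : String) : get_required_gap_alt c1 c2 =
    (if ((c1, c2) == ("BUSCH", "BUSCH") || (c1, c2) == ("BUSCH", "LIVINGSTON") ||
         (c1, c2) == ("LIVINGSTON", "BUSCH") || (c1, c2) == ("LIVINGSTON", "LIVINGSTON") ||
         (c1, c2) == ("COLLEGE AVENUE", "COLLEGE AVENUE") || (c1, c2) == ("COLLEGE AVENUE", "COOK/DOUGLASS") ||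
         (c1, c2) == ("COLLEGE AVENUE", "DOWNTOWN") ||
         (c1, c2) == ("COOK/DOUGLASS", "COLLEGE AVENUE") || (c1, c2) == ("COOK/DOUGLASS", "COOK/DOUGLASS") ||
         (c1, c2) == ("COOK/DOUGLASS", "DOWNTOWN") ||
         (c1, c2) == ("DOWNTOWN", "COLLEGE AVENUE") || (c1, c2) == ("DOWNTOWN", "COOK/DOUGLASS") ||
         (c1, c2) == ("DOWNTOWN", "DOWNTOWN")) then 30 else 40) := by
  have h : sameRegionPairs =
    [("BUSCH", "BUSCH"), ("BUSCH", "LIVINGSTON"),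
     ("LIVINGSTON", "BUSCH"), ("LIVINGSTON", "LIVINGSTON"),
     ("COLLEGE AVENUE", "COLLEGE AVENUE"), ("COLLEGE AVENUE", "COOK/DOUGLASS"),
     ("COLLEGE AVENUE", "DOWNTOWN"),
     ("COOK/DOUGLASS", "COLLEGE AVENUE"), ("COOK/DOUGLASS", "COOK/DOUGLASS"),
     ("COOK/DOUGLASS", "DOWNTOWN"),
     ("DOWNTOWN", "COLLEGE AVENUE"), ("DOWNTOWN", "COOK/DOUGLASS"),
     ("DOWNTOWN", "DOWNTOWN")] := by decide
  simp only [get_required_gap_alt, h, PySem.Set.contains_eq_listContains,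
    List.contains_cons, List.contains_nil, Bool.or_false, Bool.or_assoc]

-- every string is one of the five campuses or none of them
lemma campus_cases (c : String) :
    c = "BUSCH" ∨ c = "LIVINGSTON" ∨ c = "COLLEGE AVENUE" ∨ c = "COOK/DOUGLASS" ∨
    c = "DOWNTOWN" ∨
    ("BUSCH" ≠ c ∧ "LIVINGSTON" ≠ c ∧ "COLLEGE AVENUE" ≠ c ∧ "COOK/DOUGLASS" ≠ c ∧ "DOWNTOWN" ≠ c) := by
  tauto

lemma gap_agree (c1 c2 : String) : get_required_gap c1 c2 = get_required_gap_alt c1 c2 := by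
  rw [A_eq, B_eq]
  rcases campus_cases c1 with h | h | h | h | h | ⟨a1, a2, a3, a4, a5⟩ <;>
    rcases campus_cases c2 with g | g | g | g | g | ⟨b1, b2, b3, b4, b5⟩ <;>
    subst_vars <;> simp_all [Prod.ext_iff] <;> simp_all [eq_comm]

-- ===== VERDICT =====
theorem get_required_gap_spec : Claim_equal_get_required_gap := by
  intro c1 c2 _
  unfold Spec_get_required_gap
  exact gap_agree c1 c2
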